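-- pv_equiv track=rewrite | github.com/laurenchen0631/interview | leetcode/python/hard/*2355_maximum_number_of_books_you_can_take.py | maximumBooks
-- ===== SOURCE A (Python) =====
-- def maximumBooks(books: list[int]) -> int:
--     n = len(books)
--
--     def calculateSum(l: int, r: int) -> int:
--         h = min(books[r], r - l + 1) # [2, 0]
--         bottom = books[r] - h + 1
--
--         return (books[r] + bottom) * h // 2
--
--     stack = []
--     dp = [0] * n
--
--     for i, book in enumerate(books):
--         # While we cannot push i, we pop from the stack
--         while stack and books[stack[-1]] - stack[-1] >= book - i:
--             stack.pop()
--
--         if not stack: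
--             dp[i] = calculateSum(0, i)
--         else:
--             j = stack[-1]
--             dp[i] = dp[j] + calculateSum(j+1, i)
--         stack.append(i)
--
--     return max(dp)
-- ===== SOURCE B (Python) =====
-- def maximumBooks(books: list[int]) -> int:
--     n = len(books)
--
--     def calculateSum(l: int, r: int) -> int:
--         h = min(books[r], r - l + 1)
--         bottom = books[r] - h + 1
--         return (books[r] + bottom) * h // 2
--
--     dp = [0] * n
--     for i in range(n):
--         # scan backwards for the nearest j with books[j] - j < books[i] - i
--         j = i - 1
--         while j >= 0 and books[j] - j >= books[i] - i:
--             j -= 1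
--         if j < 0:
--             dp[i] = calculateSum(0, i)
--         else:
--             dp[i] = dp[j] + calculateSum(j + 1, i)
--     return max(dp)
-- ===== Notes on version B (the rewrite author's own statement) =====
-- stated objective: simpler
-- what changed: Replaced the monotonic stack plus dp array with a plain backward scan per index: for each i scan j from i-1 down to the first j with books[j]-j < books[i]-i (the stack top was exactly that j), so the stack disappears entirely.
import Mathlib
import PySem

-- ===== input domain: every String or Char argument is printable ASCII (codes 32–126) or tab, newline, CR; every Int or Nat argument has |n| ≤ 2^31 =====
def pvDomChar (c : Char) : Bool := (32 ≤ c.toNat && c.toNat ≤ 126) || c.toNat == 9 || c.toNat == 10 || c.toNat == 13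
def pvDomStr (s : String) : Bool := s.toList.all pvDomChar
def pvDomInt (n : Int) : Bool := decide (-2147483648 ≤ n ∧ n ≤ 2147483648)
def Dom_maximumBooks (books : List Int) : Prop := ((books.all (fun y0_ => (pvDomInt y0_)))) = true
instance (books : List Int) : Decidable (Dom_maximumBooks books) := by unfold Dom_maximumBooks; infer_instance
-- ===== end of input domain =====

-- B drops A's monotonic stack and instead, for each i, scans backwards for the nearest j with
-- books[j]-j < books[i]-i (which is exactly what A's stack top provides): simpler, no stack to maintain.

-- ===== PORT A =====
-- calculateSum(l, r) is textually identical in A and B; ported once, used by both ports.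
-- All indices passed to it are in range on every run, so pyGetD's default 0 is never read under Pre_.
def pvCalcSum (books : List Int) (l r : Int) : Int :=
  let h := min (PySem.List.pyGetD books r 0) (r - l + 1)
  let bottom := PySem.List.pyGetD books r 0 - h + 1
  PySem.Int.floordiv ((PySem.List.pyGetD books r 0 + bottom) * h) 2

-- A's inner 'while stack and books[stack[-1]] - stack[-1] >= book - i: stack.pop()'
-- (list head = Python stack top)
def pvPop (books : List Int) (i book : Int) : List Int → List Int
  | [] => []
  | t :: rest =>
    if PySem.List.pyGetD books t 0 - t ≥ book - i then pvPop books i book rest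
    else t :: rest

-- one iteration of A's for-loop; dp is represented by the list of already-assigned entries dp[0..i-1]
-- (A preallocates [0]*n and assigns dp[i] in index order, reading only dp[j] with j < i)
def pvStepA (books : List Int) (s : List Int × List Int) (p : Int × Int) : List Int × List Int :=
  let stack := pvPop books p.1 p.2 s.1
  let dpi := match stack with
    | [] => pvCalcSum books 0 p.1
    | j :: _ => PySem.List.pyGetD s.2 j 0 + pvCalcSum books (j + 1) p.1
  (p.1 :: stack, s.2 ++ [dpi])

def maximumBooks (books : List Int) : Int :=
  let s := (PySem.List.enumerate books).foldl (pvStepA books) ([], [])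
  (PySem.List.max? s.2 (fun x => x)).getD 0

-- ===== PORT B =====
-- B's backward scan 'j = i - 1; while j >= 0 and books[j] - j >= books[i] - i: j -= 1';
-- the fuel argument is j + 1, none plays the role of 'j < 0'
def pvScan (books : List Int) (ki : Int) : Nat → Option Int
  | 0 => none
  | j + 1 =>
    if PySem.List.pyGetD books (j : Int) 0 - (j : Int) ≥ ki then pvScan books ki j
    else some (j : Int)

def pvStepB (books : List Int) (dp : List Int) (i : Nat) : List Int :=
  let dpi := match pvScan books (PySem.List.pyGetD books (i : Int) 0 - (i : Int)) i with
    | none => pvCalcSum books 0 (i : Int)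
    | some j => PySem.List.pyGetD dp j 0 + pvCalcSum books (j + 1) (i : Int)
  dp ++ [dpi]

def maximumBooks_alt (books : List Int) : Int :=
  let dp := (List.range books.length).foldl (pvStepB books) []
  (PySem.List.max? dp (fun x => x)).getD 0

-- ===== PRECONDITION & SPEC =====
-- Python A raises ValueError (max() of an empty sequence) on the empty list; excluded.
def Pre_maximumBooks (books : List Int) : Prop := books ≠ []
instance (books : List Int) : Decidable (Pre_maximumBooks books) := by unfold Pre_maximumBooks; infer_instance
def pvWitness_maximumBooks : List Int := [4, 0, 2, 3]

def Spec_maximumBooks (books : List Int) (out : Int) : Prop := out = maximumBooks_alt books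
instance (books : List Int) (out : Int) : Decidable (Spec_maximumBooks books out) := by unfold Spec_maximumBooks; infer_instance

-- ===== CLAIM (what is proved, stated in full; the proofs are below) =====
def Claim_equal_maximumBooks : Prop := ∀ (books : List Int), Dom_maximumBooks books → Pre_maximumBooks books → Spec_maximumBooks books (maximumBooks books)

-- ===== LEMMAS AND PROOFS =====

-- the quantity books[j] - j that both programs compare
def pvKey (books : List Int) (j : Int) : Int := PySem.List.pyGetD books j 0 - j

-- the stack-membership invariant after k loop iterations of A
def pvGood (books : List Int) (k : Nat) (j : Int) : Prop :=
  0 ≤ j ∧ j < (k : Int) ∧ ∀ m : Int, j < m → m < (k : Int) → pvKey books j < pvKey books m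

-- A's loop state after the first k iterations
def pvSA (books : List Int) (k : Nat) : List Int × List Int :=
  ((List.range k).map (fun j : Nat => ((j : Int), PySem.List.pyGetD books (j : Int) 0))).foldl
    (pvStepA books) ([], [])

-- B's dp list after the first k iterations
def pvSB (books : List Int) (k : Nat) : List Int :=
  (List.range k).foldl (pvStepB books) []

theorem pvPop_eq_filter (books : List Int) (i book : Int) (st : List Int)
    (h : st.Pairwise (fun a b => pvKey books a > pvKey books b)) :
    pvPop books i book st = st.filter (fun j => decide (pvKey books j < book - i)) := by
  induction st with
  | nil => rfl
  | cons t rest ih =>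
    rw [List.pairwise_cons] at h
    obtain ⟨h1, h2⟩ := h
    by_cases hc : PySem.List.pyGetD books t 0 - t ≥ book - i
    · have hnot : ¬ (pvKey books t < book - i) := by simp only [pvKey]; omega
      simp only [pvPop, if_pos hc, List.filter_cons, hnot, decide_false, if_false, ih h2,
        Bool.false_eq_true]
    · have ht : pvKey books t < book - i := by simp only [pvKey]; omega
      simp only [pvPop, if_neg hc, List.filter_cons, ht, decide_true, if_true]
      congr 1
      rw [eq_comm, List.filter_eq_self]
      intro b hb
      have := h1 b hb
      simp only [decide_eq_true_eq]
      omega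

theorem pvScan_none (books : List Int) (ki : Int) (k : Nat)
    (h : pvScan books ki k = none) :
    ∀ m : Int, 0 ≤ m → m < (k : Int) → ki ≤ pvKey books m := by
  induction k with
  | zero => intro m h1 h2; omega
  | succ j ih =>
    intro m h1 h2
    by_cases hc : PySem.List.pyGetD books (j : Int) 0 - (j : Int) ≥ ki
    · simp only [pvScan, if_pos hc] at h
      by_cases hm : m = (j : Int)
      · subst hm; simp only [pvKey]; omega
      · exact ih h m h1 (by push_cast at h2 ⊢; omega)
    · simp only [pvScan, if_neg hc] at h
      exact absurd h (by simp)

theorem pvScan_some (books : List Int) (ki : Int) (k : Nat) (j : Int)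
    (h : pvScan books ki k = some j) :
    0 ≤ j ∧ j < (k : Int) ∧ pvKey books j < ki ∧
      ∀ m : Int, j < m → m < (k : Int) → ki ≤ pvKey books m := by
  induction k with
  | zero => simp [pvScan] at h
  | succ p ih =>
    by_cases hc : PySem.List.pyGetD books (p : Int) 0 - (p : Int) ≥ ki
    · simp only [pvScan, if_pos hc] at h
      obtain ⟨a1, a2, a3, a4⟩ := ih h
      refine ⟨a1, by push_cast at a2 ⊢; omega, a3, ?_⟩
      intro m hm1 hm2
      by_cases hm : m = (p : Int)
      · subst hm; simp only [pvKey]; omega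
      · exact a4 m hm1 (by push_cast at hm2 ⊢; omega)
    · simp only [pvScan, if_neg hc, Option.some.injEq] at h
      subst h
      refine ⟨by positivity, by push_cast; omega, by simp only [pvKey]; omega, ?_⟩
      intro m hm1 hm2; push_cast at hm2; omega

theorem pvHead_max {l : List Int} (h : l.Pairwise (· > ·)) {x : Int}
    (hx : x ∈ l) (hmax : ∀ y ∈ l, y ≤ x) : l.head? = some x := by
  cases l with
  | nil => simp at hx
  | cons a t =>
    rw [List.pairwise_cons] at h
    rcases List.mem_cons.mp hx with rfl | hxt
    · rfl
    · have := h.1 x hxt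
      have := hmax a (List.mem_cons_self)
      omega

theorem pvMain (books : List Int) (k : Nat) :
    (pvSA books k).2 = pvSB books k ∧ (pvSA books k).1.Pairwise (· > ·) ∧
      ∀ j : Int, j ∈ (pvSA books k).1 ↔ pvGood books k j := by
  induction k with
  | zero =>
    have h0 : pvSA books 0 = ([], []) := rfl
    refine ⟨rfl, by rw [h0]; exact List.Pairwise.nil, ?_⟩
    intro j
    rw [h0]
    constructor
    · intro h; exact absurd h (List.not_mem_nil)
    · rintro ⟨h1, h2, -⟩
      exfalso; push_cast at h2; omega
  | succ k ih =>
    obtain ⟨hdp, hpw, hchar⟩ := ih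
    have hSA : pvSA books (k+1)
        = pvStepA books (pvSA books k) ((k : Int), PySem.List.pyGetD books (k : Int) 0) := by
      simp [pvSA, List.range_succ]
    have hSB : pvSB books (k+1) = pvStepB books (pvSB books k) k := by
      simp [pvSB, List.range_succ]
    have hkeypw : (pvSA books k).1.Pairwise (fun a b => pvKey books a > pvKey books b) := by
      refine hpw.imp_of_mem ?_
      intro a b ha hb hab
      exact ((hchar b).mp hb).2.2 a hab ((hchar a).mp ha).2.1
    have hpop : pvPop books (k : Int) (PySem.List.pyGetD books (k : Int) 0) (pvSA books k).1
        = (pvSA books k).1.filter (fun j => decide (pvKey books j < pvKey books (k : Int))) :=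
      pvPop_eq_filter _ _ _ _ hkeypw
    have hcast : ∀ m : Int, m < ((k : Int) + 1) → ¬ m < (k : Int) → m = (k : Int) := by
      intro m h1 h2; omega
    cases hscan : pvScan books (PySem.List.pyGetD books (k : Int) 0 - (k : Int)) k with
    | none =>
      have hnone := pvScan_none books _ k hscan
      have hfilt : (pvSA books k).1.filter
          (fun j => decide (pvKey books j < pvKey books (k : Int))) = [] := by
        rw [List.filter_eq_nil_iff]
        intro a ha
        have hg := (hchar a).mp ha
        have := hnone a hg.1 hg.2.1
        simp only [decide_eq_true_eq, pvKey]
        simp only [pvKey] at this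
        omega
      refine ⟨?_, ?_, ?_⟩
      · rw [hSA, hSB, ← hdp]
        simp only [pvStepA, pvStepB, hpop, hfilt, hscan]
      · rw [hSA]
        simp only [pvStepA, hpop, hfilt]
        simp
      · intro j
        rw [hSA]
        simp only [pvStepA, hpop, hfilt]
        simp only [List.mem_cons, List.not_mem_nil, or_false]
        constructor
        · rintro rfl
          refine ⟨by positivity, by push_cast; omega, ?_⟩
          intro m h1 h2; push_cast at h2; omega
        · rintro ⟨g1, g2, g3⟩
          push_cast at g2
          by_cases hj : j = (k : Int)
          · exact hj
          · exfalso
            have hjk : j < (k : Int) := by omega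
            have hjst : j ∈ (pvSA books k).1 := (hchar j).mpr
              ⟨g1, hjk, fun m hm1 hm2 => g3 m hm1 (by omega)⟩
            have := hnone j g1 hjk
            have := g3 (k : Int) hjk (by omega)
            simp only [pvKey] at *
            omega
    | some j0 =>
      obtain ⟨b1, b2, b3, b4⟩ := pvScan_some books _ k j0 hscan
      rw [show PySem.List.pyGetD books (k : Int) 0 - (k : Int) = pvKey books (k : Int) from rfl]
        at b3 b4
      have hj0st : j0 ∈ (pvSA books k).1 := (hchar j0).mpr
        ⟨b1, b2, fun m hm1 hm2 => lt_of_lt_of_le b3 (b4 m hm1 hm2)⟩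
      have hj0f : j0 ∈ (pvSA books k).1.filter
          (fun j => decide (pvKey books j < pvKey books (k : Int))) :=
        List.mem_filter.mpr ⟨hj0st, by simp only [decide_eq_true_eq]; exact b3⟩
      have hfpw : ((pvSA books k).1.filter
          (fun j => decide (pvKey books j < pvKey books (k : Int)))).Pairwise (· > ·) :=
        List.Pairwise.sublist List.filter_sublist hpw
      have hmax : ∀ y ∈ (pvSA books k).1.filter
          (fun j => decide (pvKey books j < pvKey books (k : Int))), y ≤ j0 := by
        intro y hy
        obtain ⟨hyst, hyk⟩ := List.mem_filter.mp hy
        simp only [decide_eq_true_eq] at hyk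
        have hg := (hchar y).mp hyst
        by_contra hgt
        push Not at hgt
        have := b4 y hgt hg.2.1
        omega
      have hhead := pvHead_max hfpw hj0f hmax
      cases hfl : (pvSA books k).1.filter
          (fun j => decide (pvKey books j < pvKey books (k : Int))) with
      | nil => rw [hfl] at hhead; simp at hhead
      | cons a t =>
        rw [hfl] at hhead hfpw
        simp only [List.head?_cons, Option.some.injEq] at hhead
        subst hhead
        refine ⟨?_, ?_, ?_⟩
        · rw [hSA, hSB, ← hdp]
          simp only [pvStepA, pvStepB, hpop, hfl, hscan]
        · rw [hSA]
          simp only [pvStepA, hpop, hfl]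
          rw [List.pairwise_cons]
          refine ⟨?_, hfpw⟩
          intro y hy
          have hyst := (List.mem_filter.mp (hfl ▸ hy)).1
          have := ((hchar y).mp hyst).2.1
          omega
        · intro j
          rw [hSA]
          simp only [pvStepA, hpop, hfl]
          rw [List.mem_cons, ← hfl]
          constructor
          · rintro (rfl | hjf)
            · refine ⟨by positivity, by push_cast; omega, ?_⟩
              intro m h1 h2; push_cast at h2; omega
            · obtain ⟨hjst, hjk⟩ := List.mem_filter.mp hjf
              simp only [decide_eq_true_eq] at hjk
              have hg := (hchar j).mp hjst
              refine ⟨hg.1, by have := hg.2.1; push_cast; omega, ?_⟩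
              intro m hm1 hm2
              by_cases hmk : m < (k : Int)
              · exact hg.2.2 m hm1 hmk
              · rw [hcast m (by push_cast at hm2 ⊢; omega) hmk]; exact hjk
          · rintro ⟨g1, g2, g3⟩
            push_cast at g2
            by_cases hj : j = (k : Int)
            · exact Or.inl hj
            · refine Or.inr (List.mem_filter.mpr ⟨(hchar j).mpr
                ⟨g1, by omega, fun m hm1 hm2 => g3 m hm1 (by omega)⟩, ?_⟩)
              simp only [decide_eq_true_eq]
              exact g3 (k : Int) (by omega) (by omega)

theorem pvFoldA (books : List Int) :
    (PySem.List.enumerate books).foldl (pvStepA books) ([], []) = pvSA books books.length := by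
  rw [PySem.List.enumerate_eq_map_pyRange books 0,
    show PySem.List.len books = ((books.length : Nat) : Int) from by simp [pysem],
    PySem.List.pyRange_zero_natCast, List.map_map]
  rfl

-- ===== VERDICT (by name: the statement is the Claim_ definition above) =====
theorem maximumBooks_spec : Claim_equal_maximumBooks := by
  intro books _ _
  unfold Spec_maximumBooks
  simp only [maximumBooks, maximumBooks_alt]
  rw [pvFoldA books, (pvMain books books.length).1]
  rfl
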